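-- pv_equiv track=rewrite | github.com/mangowhoiscloud/geode | geode/cli/__init__.py | _parse_report_args
-- ===== SOURCE A (Python) =====
-- _FORMAT_KEYWORDS = {"html", "json", "md", "markdown"}
--
-- _TEMPLATE_KEYWORDS = {"summary", "detailed", "executive"}
--
-- def _parse_report_args(parts: list[str]) -> dict[str, str]:
--     """Parse report arguments from a list of tokens.
--
--     Returns dict with keys: ip_name, fmt, template.
--     Example: ["Berserk", "html", "detailed"]
--       → {"ip_name": "Berserk", "fmt": "html", "template": "detailed"}
--     """
--     fmt = "md"
--     template = "summary"
--     ip_parts: list[str] = []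
--
--     for part in parts:
--         lower = part.lower()
--         if lower in _FORMAT_KEYWORDS:
--             fmt = "markdown" if lower == "md" else lower
--         elif lower in _TEMPLATE_KEYWORDS:
--             template = lower
--         else:
--             ip_parts.append(part)
--
--     return {
--         "ip_name": " ".join(ip_parts) if ip_parts else "",
--         "fmt": fmt,
--         "template": template,
--     }
-- ===== SOURCE B (Python) =====
-- _FORMAT_KEYWORDS = {"html", "json", "md", "markdown"}
--
-- _TEMPLATE_KEYWORDS = {"summary", "detailed", "executive"}
--
--
-- def _parse_report_args(parts):
--     lowers = [p.lower() for p in parts]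
--     fmts = ["markdown" if l == "md" else l for l in lowers if l in _FORMAT_KEYWORDS]
--     tmpls = [l for l in lowers if l in _TEMPLATE_KEYWORDS]
--     keywords = _FORMAT_KEYWORDS | _TEMPLATE_KEYWORDS
--     return {
--         "ip_name": " ".join(p for p, l in zip(parts, lowers) if l not in keywords),
--         "fmt": fmts[-1] if fmts else "md",
--         "template": tmpls[-1] if tmpls else "summary",
--     }
-- ===== Notes on version B (the rewrite author's own statement) =====
-- stated objective: alternative
-- what changed: Replaces the single stateful loop (mutable fmt/template/ip_parts with branch order) by three independent derivations: comprehensions filter the format/template keyword occurrences and the last one wins, and the ip tokens are selected in one filtering pass.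
import Mathlib
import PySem

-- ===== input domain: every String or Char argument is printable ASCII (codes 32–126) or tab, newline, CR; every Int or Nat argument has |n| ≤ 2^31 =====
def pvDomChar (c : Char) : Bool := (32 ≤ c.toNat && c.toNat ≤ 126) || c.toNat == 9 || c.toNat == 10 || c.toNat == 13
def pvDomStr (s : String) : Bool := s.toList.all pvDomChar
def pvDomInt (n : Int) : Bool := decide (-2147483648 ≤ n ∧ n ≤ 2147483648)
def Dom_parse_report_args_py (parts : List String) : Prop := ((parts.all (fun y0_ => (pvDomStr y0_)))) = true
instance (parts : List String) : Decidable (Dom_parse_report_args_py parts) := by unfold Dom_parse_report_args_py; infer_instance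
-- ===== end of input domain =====

-- B replaces A's single stateful loop by three independent filtering passes (last keyword wins,
-- taken as the last element of the filtered list); alternative decomposition, same O(n) cost.
-- ===== PORT A =====
-- A replaces fmt/template in a mutable loop and appends non-keyword tokens; last keyword wins.
def pvFmtKw : List String := ["html", "json", "md", "markdown"]
def pvTmplKw : List String := ["summary", "detailed", "executive"]

def parse_report_args_py (parts : List String) : List (String × String) :=
  let st := parts.foldl
    (fun (st : String × String × List String) part =>
      let lower := PySem.Str.lower part
      if pvFmtKw.contains lower then
        ((if lower = "md" then "markdown" else lower), st.2.1, st.2.2)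
      else if pvTmplKw.contains lower then
        (st.1, lower, st.2.2)
      else
        (st.1, st.2.1, st.2.2 ++ [part]))
    ("md", "summary", [])
  [("ip_name", if st.2.2 ≠ [] then PySem.Str.join " " st.2.2 else ""),
   ("fmt", st.1),
   ("template", st.2.1)]

-- ===== PORT B =====
def parse_report_args_py_alt (parts : List String) : List (String × String) :=
  let lowers := parts.map PySem.Str.lower
  let fmts := (lowers.filter (fun l => pvFmtKw.contains l)).map
      (fun l => if l = "md" then "markdown" else l)
  let tmpls := lowers.filter (fun l => pvTmplKw.contains l)
  let ip := PySem.Str.join " "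
      ((parts.zip lowers).filterMap
        (fun pl => if pvFmtKw.contains pl.2 || pvTmplKw.contains pl.2 then none else some pl.1))
  [("ip_name", ip),
   ("fmt", match fmts.getLast? with | some f => f | none => "md"),
   ("template", match tmpls.getLast? with | some t => t | none => "summary")]

-- ===== PRECONDITION & SPEC =====
def Spec_parse_report_args_py (parts : List String) (out : List (String × String)) : Prop := out = parse_report_args_py_alt parts
instance (parts : List String) (out : List (String × String)) : Decidable (Spec_parse_report_args_py parts out) := by unfold Spec_parse_report_args_py; infer_instance

-- ===== CLAIM (what is proved, stated in full; the proofs are below) =====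
def Claim_equal_parse_report_args_py : Prop := ∀ (parts : List String), Dom_parse_report_args_py parts → Spec_parse_report_args_py parts (parse_report_args_py parts)

-- ===== LEMMAS AND PROOFS =====

-- overwrite-fold equals the last element (mapped)
lemma foldl_overwrite (g : String → String) (l : List String) (a : String) :
    l.foldl (fun _ x => g x) a = ((l.getLast?).map g).getD a := by
  induction l generalizing a with
  | nil => rfl
  | cons x xs ih =>
    cases xs with
    | nil => simp [List.foldl]
    | cons y ys => simpa [List.foldl, List.getLast?_cons_cons] using ih (g y)

lemma zip_filterMap (parts : List String) :
    ((parts.zip (parts.map PySem.Str.lower)).filterMap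
        (fun pl => if pvFmtKw.contains pl.2 || pvTmplKw.contains pl.2 then none else some pl.1))
      = parts.filter
          (fun p => ¬ (pvFmtKw.contains (PySem.Str.lower p)
                        || pvTmplKw.contains (PySem.Str.lower p))) := by
  induction parts with
  | nil => rfl
  | cons p ps ih =>
    simp only [List.map_cons, List.zip_cons_cons, List.filterMap_cons, List.filter_cons]
    rw [ih]
    cases h : (pvFmtKw.contains (PySem.Str.lower p) || pvTmplKw.contains (PySem.Str.lower p)) <;>
      simp [h]

lemma not_both (s : String) (h1 : pvFmtKw.contains s = true) (h2 : pvTmplKw.contains s = true) : False := by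
  simp [pvFmtKw] at h1
  rcases h1 with h | h | h | h <;> simp [h, pvTmplKw] at h2

-- characterisation of A's loop state
lemma loopA (parts : List String) (f t : String) (acc : List String) :
    parts.foldl
      (fun (st : String × String × List String) part =>
        let lower := PySem.Str.lower part
        if pvFmtKw.contains lower then
          ((if lower = "md" then "markdown" else lower), st.2.1, st.2.2)
        else if pvTmplKw.contains lower then
          (st.1, lower, st.2.2)
        else
          (st.1, st.2.1, st.2.2 ++ [part]))
      (f, t, acc)
    = ( ((parts.map PySem.Str.lower).filter (fun l => pvFmtKw.contains l)).foldl
          (fun _ l => if l = "md" then "markdown" else l) f,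
        ((parts.map PySem.Str.lower).filter (fun l => pvTmplKw.contains l)).foldl
          (fun _ l => l) t,
        acc ++ parts.filter
          (fun p => ¬ (pvFmtKw.contains (PySem.Str.lower p)
                        || pvTmplKw.contains (PySem.Str.lower p))) ) := by
  induction parts generalizing f t acc with
  | nil => simp
  | cons p ps ih =>
    simp only [List.map_cons, List.filter_cons, List.foldl_cons]
    cases hf : pvFmtKw.contains (PySem.Str.lower p) <;>
      cases ht : pvTmplKw.contains (PySem.Str.lower p)
    · simp only [hf, ht, Bool.false_eq_true, if_false, Bool.or_self, decide_not, decide_false,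
        Bool.not_false, List.foldl_cons]
      rw [ih]
      simp
    · simp only [hf, ht, Bool.false_eq_true, if_false, if_true, Bool.false_or, decide_not,
        decide_true, decide_false, Bool.not_true, List.foldl_cons]
      rw [ih]; simp
    · simp only [hf, ht, Bool.false_eq_true, if_true, if_false, Bool.or_false, decide_not,
        decide_true, decide_false, Bool.not_true, List.foldl_cons]
      rw [ih]; simp
    · exact (not_both _ hf ht).elim

-- ===== VERDICT (by name: the statement is the Claim_ definition above) =====
theorem parse_report_args_py_spec : Claim_equal_parse_report_args_py := by
  intro parts _
  show parse_report_args_py parts = parse_report_args_py_alt parts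
  unfold parse_report_args_py parse_report_args_py_alt
  rw [loopA]
  simp only [foldl_overwrite (fun l => if l = "md" then "markdown" else l),
    foldl_overwrite (fun l => l), zip_filterMap, List.getLast?_map, List.nil_append,
    Option.map_id_fun', id]
  cases hF : (((parts.map PySem.Str.lower).filter (fun l => pvFmtKw.contains l)).getLast?) <;>
  cases hT : (((parts.map PySem.Str.lower).filter (fun l => pvTmplKw.contains l)).getLast?) <;>
  cases hI : (parts.filter
      (fun p => ¬ (pvFmtKw.contains (PySem.Str.lower p)
                    || pvTmplKw.contains (PySem.Str.lower p)))) <;>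
    simp_all [PySem.Str.join]
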